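-- pv_equiv track=rewrite | github.com/supermitch/Advent-of-Code | 2016/13/thirteen.py | get_tile
-- ===== SOURCE A (Python) =====
-- def get_tile(x, y, input):
--     z = (x * x) + (3 * x) + (2 * x * y) + (y) + (y * y)
--     total = z + input
--     binary = format(total, 'b')
--     bit_sum = sum(b == '1' for b in binary)
--     if not bit_sum % 2:
--         return '.'
--     else:
--         return '#'
-- ===== SOURCE B (Python) =====
-- def get_tile(x, y, input):
--     t = abs((x * x) + (3 * x) + (2 * x * y) + y + (y * y) + input)
--     parity = 0
--     while t:
--         parity ^= t & 1
--         t >>= 1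
--     return '.' if parity == 0 else '#'
-- ===== Notes on version B (the rewrite author's own statement) =====
-- stated objective: alternative
-- what changed: B replaces A's binary-string formatting and character-counting pass with a shift-and-test loop that xors the low bit of the integer magnitude, returning '.' when the accumulated bit parity is 0.
import Mathlib
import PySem

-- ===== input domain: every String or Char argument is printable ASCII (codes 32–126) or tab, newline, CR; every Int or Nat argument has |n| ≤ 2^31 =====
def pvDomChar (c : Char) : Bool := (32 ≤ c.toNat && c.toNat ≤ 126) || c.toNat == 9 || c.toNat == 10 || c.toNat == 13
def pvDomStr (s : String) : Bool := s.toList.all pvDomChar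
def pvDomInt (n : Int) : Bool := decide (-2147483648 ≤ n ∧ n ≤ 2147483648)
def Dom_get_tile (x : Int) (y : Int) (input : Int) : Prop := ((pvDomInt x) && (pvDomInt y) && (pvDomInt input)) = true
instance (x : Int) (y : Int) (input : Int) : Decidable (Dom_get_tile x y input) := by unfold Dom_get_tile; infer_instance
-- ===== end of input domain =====

-- B replaces A's binary-string formatting and '1'-character counting with a shift-and-test
-- loop xoring the low bit of the integer magnitude (alternative decomposition, same cost).

-- ===== PORT A =====
-- format(n,'b') for n > 0: binary digits, most significant first (hand port, exact for Nat > 0)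
def pvBinDigits : Nat → List Char
  | 0 => []
  | n+1 => pvBinDigits ((n+1)/2) ++ [if (n+1) % 2 == 1 then '1' else '0']
decreasing_by exact Nat.div_lt_self (Nat.succ_pos n) (by norm_num)

def get_tile (x : Int) (y : Int) (input : Int) : String :=
  let z := (x * x) + (3 * x) + (2 * x * y) + (y) + (y * y)
  let total := z + input
  -- format(total,'b'): "0" for 0, '-' prefix for negatives (exact port of CPython's format)
  let binary : List Char :=
    if total < 0 then '-' :: pvBinDigits total.natAbs
    else if total = 0 then ['0']
    else pvBinDigits total.natAbs
  let bit_sum := binary.count '1'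
  if bit_sum % 2 == 0 then "." else "#"

-- ===== PORT B =====
-- the while loop: parity ^= t & 1; t >>= 1
def pvParityLoop : Nat → Nat → Nat
  | 0, parity => parity
  | n+1, parity => pvParityLoop ((n+1) >>> 1) (parity ^^^ ((n+1) &&& 1))
decreasing_by simpa using Nat.div_lt_self (Nat.succ_pos n) (by norm_num)

def get_tile_alt (x : Int) (y : Int) (input : Int) : String :=
  let t := ((x * x) + (3 * x) + (2 * x * y) + y + (y * y) + input).natAbs
  if pvParityLoop t 0 = 0 then "." else "#"

-- ===== PRECONDITION & SPEC =====
def Spec_get_tile (x : Int) (y : Int) (input : Int) (out : String) : Prop := out = get_tile_alt x y input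
instance (x : Int) (y : Int) (input : Int) (out : String) : Decidable (Spec_get_tile x y input out) := by unfold Spec_get_tile; infer_instance

-- ===== CLAIM (what is proved, stated in full; the proofs are below) =====
def Claim_equal_get_tile : Prop := ∀ (x : Int) (y : Int) (input : Int), Dom_get_tile x y input → Spec_get_tile x y input (get_tile x y input)

-- ===== LEMMAS AND PROOFS =====

theorem pvBinDigits_count (n : Nat) :
    (pvBinDigits n).count '1' = n % 2 + (pvBinDigits (n / 2)).count '1' := by
  cases n with
  | zero => simp [pvBinDigits]
  | succ m =>
    rw [pvBinDigits]
    rcases Nat.mod_two_eq_zero_or_one (m+1) with h | h <;>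
      simp [List.count_append, h, Nat.add_comm]

theorem pvParityLoop_eq (n : Nat) : ∀ p, p ≤ 1 →
    pvParityLoop n p = (p + (pvBinDigits n).count '1') % 2 := by
  induction n using Nat.strong_induction_on with
  | _ n ih =>
    intro p hp
    cases n with
    | zero =>
      simp [pvParityLoop, pvBinDigits]
      omega
    | succ m =>
      rw [pvParityLoop]
      have hlt : (m+1) >>> 1 < m + 1 := by
        simpa using Nat.div_lt_self (Nat.succ_pos m) (by norm_num)
      have hb : (m+1) &&& 1 = (m+1) % 2 := Nat.and_one_is_mod _
      have hx : p ^^^ ((m+1) &&& 1) ≤ 1 := by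
        rw [hb]
        interval_cases p <;> rcases Nat.mod_two_eq_zero_or_one (m+1) with h | h <;>
          simp [h]
      rw [ih _ hlt _ hx, pvBinDigits_count (m+1)]
      have hs : (m+1) >>> 1 = (m+1) / 2 := Nat.shiftRight_one _
      rw [hs, hb]
      interval_cases p <;> rcases Nat.mod_two_eq_zero_or_one (m+1) with h | h <;>
        simp [h, Nat.add_mod]; omega

theorem pvParityLoop_zero (n : Nat) :
    pvParityLoop n 0 = (pvBinDigits n).count '1' % 2 := by
  simpa using pvParityLoop_eq n 0 (by omega)

-- ===== VERDICT (by name: the statement is the Claim_ definition above) =====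
theorem get_tile_spec : Claim_equal_get_tile := by
  intro x y input _
  unfold Spec_get_tile get_tile get_tile_alt
  set t := (x * x) + (3 * x) + (2 * x * y) + (y) + (y * y) + input with ht
  have harg : (x * x) + (3 * x) + (2 * x * y) + (y) + (y * y) + input = t := rfl
  simp only [harg]
  rw [pvParityLoop_zero]
  rcases lt_trichotomy t 0 with h | h | h
  · simp [if_pos h]
  · have : t.natAbs = 0 := by simp [h]
    simp [h, pvBinDigits]
  · have h1 : ¬ t < 0 := by omega
    have h2 : t ≠ 0 := by omega
    simp only [if_neg h1, if_neg h2]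
    rcases Nat.mod_two_eq_zero_or_one ((pvBinDigits t.natAbs).count '1') with hm | hm <;>
      simp [hm]
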